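-- pv_equiv track=rewrite | github.com/BerBai/codedb | MarsCode/最佳人选.py | solution
-- ===== SOURCE A (Python) =====
-- def solution(m, n, target, array):
--     # 初始化字母差异值字典
--     diff_dict = {
--         'A': {'A': 0, 'B': 1, 'C': 2, 'D': 3, 'E': float('inf')},
--         'B': {'A': 1, 'B': 0, 'C': 1, 'D': float('inf'), 'E': float('inf')},
--         'C': {'A': 2, 'B': 1, 'C': 0, 'D': 1, 'E': float('inf')},
--         'D': {'A': 3, 'B': float('inf'), 'C': 1, 'D': 0, 'E': 1},
--         'E': {'A': float('inf'), 'B': float('inf'), 'C': float('inf'), 'D': 1, 'E': 0}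
--     }
--     ans = {}
--     # 初始化最小差异值和最佳匹配士兵
--     min_diff = float('inf')
--     best_match = None
--
--     # 遍历每个候选士兵
--     for soldier in array:
--         total_diff = 0
--         incompatible = False
--
--         # 计算每个维度的差异值
--         for i in range(m):
--             diff = diff_dict[target[i]][soldier[i]]
--             if diff == float('inf'):
--                 incompatible = True
--                 break
--             total_diff += diff
--
--         # 如果存在不相容性格类型，跳过该士兵
--         if incompatible:
--             continue
--
--         # 更新最小差异值和最佳匹配士兵
--         if total_diff <= min_diff:
--             min_diff = total_diff
--             best_match = soldier
--             # 最佳人选存在多个，记录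
--             if total_diff not in ans:
--                 ans[total_diff] = []
--             ans[total_diff].append(''.join(soldier))
--     # 如果best_match为空，则表示不存在最佳匹配士兵
--     return ' '.join(ans[min_diff]) if best_match else 'None'
-- ===== SOURCE B (Python) =====
-- def solution(m, n, target, array):
--     diff_dict = {
--         'A': {'A': 0, 'B': 1, 'C': 2, 'D': 3, 'E': float('inf')},
--         'B': {'A': 1, 'B': 0, 'C': 1, 'D': float('inf'), 'E': float('inf')},
--         'C': {'A': 2, 'B': 1, 'C': 0, 'D': 1, 'E': float('inf')},
--         'D': {'A': 3, 'B': float('inf'), 'C': 1, 'D': 0, 'E': 1},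
--         'E': {'A': float('inf'), 'B': float('inf'), 'C': float('inf'), 'D': 1, 'E': 0}
--     }
--
--     def score(soldier):
--         total = 0
--         for i in range(m):
--             d = diff_dict[target[i]][soldier[i]]
--             if d == float('inf'):
--                 return None
--             total += d
--         return total
--
--     results = []
--     for soldier in array:
--         d = score(soldier)
--         if d is not None:
--             results.append((''.join(soldier), d))
--     if not results:
--         return 'None'
--     min_diff = min(d for _, d in results)
--     return ' '.join(s for s, d in results if d == min_diff)
-- ===== Notes on version B (the rewrite author's own statement) =====
-- stated objective: simpler
-- what changed: A's running-min state machine (min_diff/best_match, a dict of lists keyed by every running minimum, and a truthiness test on best_match) is replaced by collect-then-select: one pass collecting (joined soldier, score) pairs, then min over the collected scores and an == min filter in input order.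
-- intended difference: On m <= 0 with a nonempty array whose last soldier is the empty list, every soldier is compatible with difference 0 but A's 'if best_match' sees the empty-list soldier as falsy and returns 'None'; B returns the space-joined soldiers, the intended value since compatible soldiers exist. — e.g. on solution(0, 1, "", [["x"], []]): A returns "None", B returns "x "
import Mathlib
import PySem

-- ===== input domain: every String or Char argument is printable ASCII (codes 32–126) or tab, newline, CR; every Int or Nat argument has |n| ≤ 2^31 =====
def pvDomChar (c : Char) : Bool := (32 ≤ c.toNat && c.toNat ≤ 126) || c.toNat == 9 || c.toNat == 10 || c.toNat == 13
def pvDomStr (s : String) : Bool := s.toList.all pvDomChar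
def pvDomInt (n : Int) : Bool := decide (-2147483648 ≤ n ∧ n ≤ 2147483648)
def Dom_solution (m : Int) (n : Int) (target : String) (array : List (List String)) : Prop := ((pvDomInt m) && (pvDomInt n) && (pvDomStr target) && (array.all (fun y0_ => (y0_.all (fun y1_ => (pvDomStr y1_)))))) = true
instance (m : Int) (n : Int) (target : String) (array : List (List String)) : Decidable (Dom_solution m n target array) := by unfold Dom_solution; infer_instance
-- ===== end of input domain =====

-- B keeps A's per-soldier scoring loop but replaces A's running-min state machine
-- (min_diff / best_match / dict of lists keyed by every running minimum, plus a truthiness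
-- test on best_match) by: collect (joined soldier, score) pairs, take the min, filter.
-- Objective: simpler. Equivalence of the RETURN value is proved outside D_solution below.

-- the personality-difference table: `none` both for the float('inf') entries and for
-- characters outside 'A'..'E' (where the Python raises KeyError; excluded by Pre_solution)
def pvTable (c : Char) (s : String) : Option Int :=
  match c, s with
  | 'A', "A" => some 0 | 'A', "B" => some 1 | 'A', "C" => some 2 | 'A', "D" => some 3
  | 'B', "A" => some 1 | 'B', "B" => some 0 | 'B', "C" => some 1
  | 'C', "A" => some 2 | 'C', "B" => some 1 | 'C', "C" => some 0 | 'C', "D" => some 1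
  | 'D', "A" => some 3 | 'D', "C" => some 1 | 'D', "D" => some 0 | 'D', "E" => some 1
  | 'E', "D" => some 1 | 'E', "E" => some 0
  | _, _ => none

-- ===== PORT A =====
-- A's inner `for i in range(m)` loop with break-on-inf (none = break / raise, excluded by Pre_)
def solGoA (target : String) (soldier : List String) : Nat → Int → Int → Option Int
  | 0, _, td => some td
  | fuel + 1, i, td =>
    match PySem.Str.pyGet? target i, PySem.List.pyGet? soldier i with
    | some c, some s =>
      match pvTable c s with
      | some d => solGoA target soldier fuel (i + 1) (td + d)
      | none => none
    | _, _ => none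

-- A's outer loop: running (min_diff, best_match, ans) state
def solOuterA (m : Int) (target : String) :
    List (List String) → Option Int → Option (List String) → PySem.Dict Int (List String) →
    Option Int × Option (List String) × PySem.Dict Int (List String)
  | [], minD, best, ans => (minD, best, ans)
  | soldier :: rest, minD, best, ans =>
    match solGoA target soldier m.toNat 0 0 with
    | none => solOuterA m target rest minD best ans
    | some td =>
      if minD.all (fun v => decide (td ≤ v)) then
        solOuterA m target rest (some td) (some soldier)
          (ans.modify td [] (· ++ [PySem.Str.join "" soldier]))
      else
        solOuterA m target rest minD best ans

def solution (m : Int) (n : Int) (target : String) (array : List (List String)) : String :=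
  match solOuterA m target array none none PySem.Dict.empty with
  | (minD, best, ans) =>
    match best with
    | none => "None"
    | some [] => "None"             -- best_match = [] is falsy in Python
    | some (_ :: _) =>
      match minD with
      | some v => PySem.Str.join " " (ans.getD v [])
      | none => "None"              -- unreachable: best set only together with min_diff

-- ===== PORT B =====
-- B's `score` helper: same inner loop, early `return None` on an inf entry
def solGoB (target : String) (soldier : List String) : Nat → Int → Int → Option Int
  | 0, _, total => some total
  | fuel + 1, i, total =>
    match PySem.Str.pyGet? target i, PySem.List.pyGet? soldier i with
    | some c, some s =>
      match pvTable c s with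
      | some d => solGoB target soldier fuel (i + 1) (total + d)
      | none => none
    | _, _ => none

def solScoreB (m : Int) (target : String) (soldier : List String) : Option Int :=
  solGoB target soldier m.toNat 0 0

def solution_alt (m : Int) (n : Int) (target : String) (array : List (List String)) : String :=
  let results := array.foldl (fun acc soldier =>
    match solScoreB m target soldier with
    | some d => acc ++ [(PySem.Str.join "" soldier, d)]
    | none => acc) []
  match results with
  | [] => "None"
  | r :: rs =>
    let minDiff := rs.foldl (fun a p => min a p.2) r.2
    PySem.Str.join " " (((r :: rs).filter (fun p => p.2 == minDiff)).map (·.1))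

-- ===== PRECONDITION & SPEC =====
-- position i of (target, soldier) is readable without KeyError/IndexError
def pvReadB (target : String) (soldier : List String) (i : Int) : Bool :=
  match PySem.Str.pyGet? target i, PySem.List.pyGet? soldier i with
  | some c, some s => ("ABCDE".toList.contains c) && (["A", "B", "C", "D", "E"].contains s)
  | _, _ => false

-- position i is readable with a finite table value (the loop continues past it)
def pvFinB (target : String) (soldier : List String) (i : Int) : Bool :=
  match PySem.Str.pyGet? target i, PySem.List.pyGet? soldier i with
  | some c, some s => (pvTable c s).isSome
  | _, _ => false

-- a position the loop can still be at is bounded by m and by both lengths (a position is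
-- only reached when every earlier one was finite, hence in range of target and soldier)
def pvStop (m : Int) (target : String) (soldier : List String) : Nat :=
  min m.toNat (min target.length soldier.length + 1)

-- exactly the inputs where A returns normally: for every soldier, each position the inner
-- loop actually reaches (all earlier positions finite) is readable (indices in range, both
-- characters table keys) — otherwise the Python raises IndexError/KeyError
def Pre_solution (m : Int) (n : Int) (target : String) (array : List (List String)) : Prop :=
  ∀ soldier ∈ array, ∀ i ∈ List.range (pvStop m target soldier),
    (∀ j ∈ List.range i, pvFinB target soldier (j : Int) = true) →
    pvReadB target soldier (i : Int) = true
instance (m : Int) (n : Int) (target : String) (array : List (List String)) : Decidable (Pre_solution m n target array) := by unfold Pre_solution; infer_instance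

def pvWitness_solution : Int × Int × String × List (List String) := (1, 2, "A", [["B"], ["A"], ["B"], ["A"]])

-- On m ≤ 0 with a nonempty array whose LAST soldier is the empty list, every soldier is
-- compatible with difference 0, but A's `if best_match` truthiness test sees the empty list
-- as falsy and A returns 'None'; B returns the space-joined list of all soldiers, the
-- intended answer, since compatible soldiers do exist.
def D_solution (m : Int) (n : Int) (target : String) (array : List (List String)) : Prop :=
  m ≤ 0 ∧ array ≠ [] ∧ array.getLast? = some []
instance (m : Int) (n : Int) (target : String) (array : List (List String)) : Decidable (D_solution m n target array) := by unfold D_solution; infer_instance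

def Spec_solution (m : Int) (n : Int) (target : String) (array : List (List String)) (out : String) : Prop := ¬ D_solution m n target array → out = solution_alt m n target array
instance (m : Int) (n : Int) (target : String) (array : List (List String)) (out : String) : Decidable (Spec_solution m n target array out) := by unfold Spec_solution; infer_instance

def pvDiffWitness_solution : Int × Int × String × List (List String) := (0, 1, "", [["x"], []])
def pvDiffWitnessOut_solution : String × String := ("None", "x ")

-- ===== CLAIM (what is proved, stated in full; the proofs are below) =====
def Claim_unchanged_solution : Prop := ∀ (m : Int) (n : Int) (target : String) (array : List (List String)), Dom_solution m n target array → Pre_solution m n target array → Spec_solution m n target array (solution m n target array)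
def Claim_changed_solution : Prop := Dom_solution (pvDiffWitness_solution.1) (pvDiffWitness_solution.2.1) (pvDiffWitness_solution.2.2.1) (pvDiffWitness_solution.2.2.2) ∧ Pre_solution (pvDiffWitness_solution.1) (pvDiffWitness_solution.2.1) (pvDiffWitness_solution.2.2.1) (pvDiffWitness_solution.2.2.2) ∧ D_solution (pvDiffWitness_solution.1) (pvDiffWitness_solution.2.1) (pvDiffWitness_solution.2.2.1) (pvDiffWitness_solution.2.2.2) ∧ solution (pvDiffWitness_solution.1) (pvDiffWitness_solution.2.1) (pvDiffWitness_solution.2.2.1) (pvDiffWitness_solution.2.2.2) = pvDiffWitnessOut_solution.1 ∧ solution_alt (pvDiffWitness_solution.1) (pvDiffWitness_solution.2.1) (pvDiffWitness_solution.2.2.1) (pvDiffWitness_solution.2.2.2) = pvDiffWitnessOut_solution.2 ∧ pvDiffWitnessOut_solution.1 ≠ pvDiffWitnessOut_solution.2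
def Claim_exact_solution : Prop := ∀ (m : Int) (n : Int) (target : String) (array : List (List String)), Dom_solution m n target array → Pre_solution m n target array → D_solution m n target array → solution m n target array ≠ solution_alt m n target array

-- ===== LEMMAS AND PROOFS =====

-- the compatible soldiers with their scores, in input order
def pvR (m : Int) (target : String) (array : List (List String)) : List (List String × Int) :=
  array.filterMap (fun s => (solGoA target s m.toNat 0 0).map (fun d => (s, d)))

def pvMval : List (List String × Int) → Int
  | [] => 0
  | p :: ps => ps.foldl (fun a q => min a q.2) p.2

def pvAch (R : List (List String × Int)) : List (List String × Int) :=
  R.filter (fun p => p.2 == pvMval R)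

-- invariant of A's outer loop after the soldiers contributing R have been processed
def pvInv (R : List (List String × Int)) (minD : Option Int) (best : Option (List String))
    (ans : PySem.Dict Int (List String)) : Prop :=
  minD = (if R = [] then none else some (pvMval R)) ∧
  best = ((pvAch R).map (·.1)).getLast? ∧
  (R ≠ [] → ans.getD (pvMval R) [] = (pvAch R).map (fun q => PySem.Str.join "" q.1)) ∧
  (∀ w : Int, (R = [] ∨ w < pvMval R) → ans.getD w [] = [])

theorem go_eq (target : String) (soldier : List String) :
    ∀ (fuel : Nat) (i td : Int), solGoB target soldier fuel i td = solGoA target soldier fuel i td := by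
  intro fuel
  induction fuel with
  | zero => intro i td; rfl
  | succ f ih =>
    intro i td
    simp only [solGoA, solGoB]
    cases PySem.Str.pyGet? target i <;> cases PySem.List.pyGet? soldier i <;> simp
    rename_i c s
    cases pvTable c s <;> simp [ih]

theorem foldl_min_le (l : List (List String × Int)) : ∀ (a : Int),
    l.foldl (fun a q => min a q.2) a ≤ a ∧ ∀ q ∈ l, l.foldl (fun a q => min a q.2) a ≤ q.2 := by
  induction l with
  | nil => intro a; simp
  | cons p ps ih =>
    intro a
    simp only [List.foldl_cons]
    obtain ⟨h1, h2⟩ := ih (min a p.2)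
    refine ⟨le_trans h1 (by omega), ?_⟩
    intro q hq
    rcases List.mem_cons.mp hq with h | h
    · subst h; exact le_trans h1 (by omega)
    · exact h2 q h

theorem mval_le_mem (R : List (List String × Int)) (q : List String × Int) (hq : q ∈ R) :
    pvMval R ≤ q.2 := by
  cases R with
  | nil => cases hq
  | cons p ps =>
    rcases List.mem_cons.mp hq with h | h
    · subst h; exact (foldl_min_le ps q.2).1
    · exact (foldl_min_le ps p.2).2 q h

theorem foldl_min_attained (l : List (List String × Int)) : ∀ (a : Int),
    l.foldl (fun a q => min a q.2) a = a ∨ ∃ q ∈ l, l.foldl (fun a q => min a q.2) a = q.2 := by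
  induction l with
  | nil => intro a; left; rfl
  | cons p ps ih =>
    intro a
    simp only [List.foldl_cons]
    rcases ih (min a p.2) with h | ⟨q, hq, he⟩
    · rw [h]
      rcases (by omega : a ≤ p.2 ∨ p.2 < a) with hle | hlt
      · left; omega
      · right; exact ⟨p, List.mem_cons_self .., by omega⟩
    · right; exact ⟨q, List.mem_cons_of_mem _ hq, he⟩

theorem mval_mem (R : List (List String × Int)) (h : R ≠ []) : ∃ q ∈ R, q.2 = pvMval R := by
  cases R with
  | nil => simp at h
  | cons p ps =>
    rcases foldl_min_attained ps p.2 with he | ⟨q, hq, he⟩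
    · exact ⟨p, List.mem_cons_self .., by simp [pvMval, he]⟩
    · exact ⟨q, List.mem_cons_of_mem _ hq, by simp [pvMval, he]⟩

theorem mval_append_singleton (R : List (List String × Int)) (p : List String × Int) (h : R ≠ []) :
    pvMval (R ++ [p]) = min (pvMval R) p.2 := by
  cases R with
  | nil => simp at h
  | cons q qs => simp [pvMval, List.foldl_append]

theorem ach_append (Rp : List (List String × Int)) (p : List String × Int)
    (hm : pvMval (Rp ++ [p]) = p.2) :
    pvAch (Rp ++ [p]) = Rp.filter (fun q => q.2 == p.2) ++ [p] := by
  simp [pvAch, hm, List.filter_append]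

theorem inv_step_le (Rp : List (List String × Int)) (minD : Option Int) (best : Option (List String))
    (ans : PySem.Dict Int (List String)) (soldier : List String) (td : Int)
    (h : pvInv Rp minD best ans) (hc : minD.all (fun v => decide (td ≤ v)) = true) :
    pvInv (Rp ++ [(soldier, td)]) (some td) (some soldier)
      (ans.modify td [] (· ++ [PySem.Str.join "" soldier])) := by
  obtain ⟨h1, h2, h3, h4⟩ := h
  by_cases hRp : Rp = []
  · subst hRp
    refine ⟨by simp [pvMval], by simp [pvAch, pvMval], ?_, ?_⟩
    · intro _
      have hmv0 : pvMval ([] ++ [(soldier, td)]) = td := by simp [pvMval]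
      rw [hmv0, PySem.Dict.getD_modify_self, h4 td (Or.inl rfl)]
      simp [pvAch, pvMval]
    · intro w hw
      rcases hw with hw | hw
      · simp at hw
      · have hwt : w ≠ td := by simp [pvMval] at hw; omega
        rw [PySem.Dict.getD_modify]
        simp only [if_neg hwt]
        exact h4 w (Or.inl rfl)
  · have hm : minD = some (pvMval Rp) := by rw [h1, if_neg hRp]
    have hle : td ≤ pvMval Rp := by
      rw [hm] at hc; simpa using hc
    have hmv : pvMval (Rp ++ [(soldier, td)]) = td := by
      rw [mval_append_singleton _ _ hRp]; simp; omega
    have hach := ach_append Rp (soldier, td) hmv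
    rcases (by omega : td = pvMval Rp ∨ td < pvMval Rp) with heq | hlt
    · have hfil : Rp.filter (fun q => q.2 == td) = pvAch Rp := by
        simp only [pvAch, heq]
      refine ⟨by simp [hmv], ?_, ?_, ?_⟩
      · rw [hach, hfil]; simp
      · intro _
        rw [hmv, hach, hfil, PySem.Dict.getD_modify_self, List.map_append]
        rw [← heq] at h3
        rw [h3 hRp]
        simp
      · intro w hw
        rcases hw with hw | hw
        · simp at hw
        · rw [hmv] at hw
          have hwt : w ≠ td := by omega
          rw [PySem.Dict.getD_modify]
          simp only [if_neg hwt]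
          exact h4 w (Or.inr (by omega))
    · have hfil : Rp.filter (fun q => q.2 == td) = [] := by
        apply List.filter_eq_nil_iff.mpr
        intro q hq
        have := mval_le_mem Rp q hq
        simp; omega
      refine ⟨by simp [hmv], ?_, ?_, ?_⟩
      · rw [hach, hfil]; simp
      · intro _
        rw [hmv, hach, hfil, PySem.Dict.getD_modify_self, h4 td (Or.inr hlt)]
        simp
      · intro w hw
        rcases hw with hw | hw
        · simp at hw
        · rw [hmv] at hw
          have hwt : w ≠ td := by omega
          rw [PySem.Dict.getD_modify]
          simp only [if_neg hwt]
          exact h4 w (Or.inr (by omega))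

theorem inv_step_gt (Rp : List (List String × Int)) (minD : Option Int) (best : Option (List String))
    (ans : PySem.Dict Int (List String)) (soldier : List String) (td : Int)
    (h : pvInv Rp minD best ans) (hc : minD.all (fun v => decide (td ≤ v)) = false) :
    pvInv (Rp ++ [(soldier, td)]) minD best ans := by
  obtain ⟨h1, h2, h3, h4⟩ := h
  by_cases hRp : Rp = []
  · subst hRp; simp [h1] at hc
  · have hm : minD = some (pvMval Rp) := by rw [h1, if_neg hRp]
    have hgt : pvMval Rp < td := by
      rw [hm] at hc; simpa using hc
    have hmv : pvMval (Rp ++ [(soldier, td)]) = pvMval Rp := by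
      rw [mval_append_singleton _ _ hRp]; omega
    have hach : pvAch (Rp ++ [(soldier, td)]) = pvAch Rp := by
      simp only [pvAch, hmv, List.filter_append]
      have hb : (((soldier, td) : List String × Int).2 == pvMval Rp) = false := by
        simp only [beq_eq_false_iff_ne, ne_eq]
        omega
      simp [hb]
    refine ⟨by simp [hmv, h1, hRp], by rw [hach]; exact h2, ?_, ?_⟩
    · intro _
      rw [hmv, hach]
      exact h3 hRp
    · intro w hw
      rcases hw with hw | hw
      · simp at hw
      · rw [hmv] at hw
        exact h4 w (Or.inr hw)

theorem pvR_cons (m : Int) (target : String) (soldier : List String) (rest : List (List String)) :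
    pvR m target (soldier :: rest) =
      match solGoA target soldier m.toNat 0 0 with
      | none => pvR m target rest
      | some td => (soldier, td) :: pvR m target rest := by
  cases hs : solGoA target soldier m.toNat 0 0 <;>
    simp [pvR, hs]

theorem outer_inv (m : Int) (target : String) :
    ∀ (arr : List (List String)) (Rp : List (List String × Int)) (minD : Option Int)
      (best : Option (List String)) (ans : PySem.Dict Int (List String)),
      pvInv Rp minD best ans →
      pvInv (Rp ++ pvR m target arr) (solOuterA m target arr minD best ans).1
        (solOuterA m target arr minD best ans).2.1 (solOuterA m target arr minD best ans).2.2 := by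
  intro arr
  induction arr with
  | nil => intro Rp minD best ans h; simpa [solOuterA, pvR] using h
  | cons soldier rest ih =>
    intro Rp minD best ans h
    rw [pvR_cons]
    simp only [solOuterA]
    cases hs : solGoA target soldier m.toNat 0 0 with
    | none => exact ih Rp minD best ans h
    | some td =>
      dsimp only
      rw [show Rp ++ (soldier, td) :: pvR m target rest
            = (Rp ++ [(soldier, td)]) ++ pvR m target rest by simp]
      by_cases hc : minD.all (fun v => decide (td ≤ v)) = true
      · rw [if_pos hc]
        have hstep := inv_step_le Rp minD best ans soldier td h hc
        have hres := ih (Rp ++ [(soldier, td)]) (some td) (some soldier)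
          (ans.modify td [] (· ++ [PySem.Str.join "" soldier])) hstep
        simpa using hres
      · rw [if_neg hc]
        simp only [Bool.not_eq_true] at hc
        have hstep := inv_step_gt Rp minD best ans soldier td h hc
        have hres := ih (Rp ++ [(soldier, td)]) minD best ans hstep
        simpa using hres

theorem collect_eq (m : Int) (target : String) :
    ∀ (arr : List (List String)) (acc : List (String × Int)),
      arr.foldl (fun acc soldier =>
        match solScoreB m target soldier with
        | some d => acc ++ [(PySem.Str.join "" soldier, d)]
        | none => acc) acc
      = acc ++ (pvR m target arr).map (fun q => (PySem.Str.join "" q.1, q.2)) := by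
  intro arr
  induction arr with
  | nil => intro acc; simp [pvR]
  | cons soldier rest ih =>
    intro acc
    rw [List.foldl_cons, pvR_cons]
    have hsc : solScoreB m target soldier
        = solGoA target soldier m.toNat 0 0 := go_eq target soldier m.toNat 0 0
    cases hs : solGoA target soldier m.toNat 0 0 with
    | none => rw [hsc, hs]; simp [ih]
    | some td => rw [hsc, hs]; simp [ih]

theorem b_char (m : Int) (n : Int) (target : String) (array : List (List String)) :
    solution_alt m n target array =
      match pvR m target array with
      | [] => "None"
      | R => PySem.Str.join " " ((pvAch R).map (fun q => PySem.Str.join "" q.1)) := by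
  unfold solution_alt
  rw [collect_eq m target array []]
  cases hR : pvR m target array with
  | nil => simp
  | cons p ps =>
    simp only [List.nil_append, List.map_cons]
    have hmin : (ps.map (fun q => (PySem.Str.join "" q.1, q.2))).foldl
        (fun a q => min a q.2) ((PySem.Str.join "" p.1, p.2)).2 = pvMval (p :: ps) := by
      rw [List.foldl_map]
      rfl
    rw [hmin]
    have hfm : (((p :: ps).map (fun q => (PySem.Str.join "" q.1, q.2))).filter
          (fun q => q.2 == pvMval (p :: ps))).map (fun q => q.1)
        = (pvAch (p :: ps)).map (fun q => PySem.Str.join "" q.1) := by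
      rw [List.filter_map, List.map_map]
      rfl
    simp only [List.map_cons] at hfm
    rw [hfm]

theorem inv_init : pvInv [] none none PySem.Dict.empty := by
  refine ⟨by simp, by simp [pvAch], by simp, ?_⟩
  intro w _
  simp [PySem.Dict.getD_empty]

theorem a_char (m : Int) (n : Int) (target : String) (array : List (List String)) :
    solution m n target array =
      match ((pvAch (pvR m target array)).map (·.1)).getLast? with
      | none => "None"
      | some [] => "None"
      | some (_ :: _) =>
        PySem.Str.join " " ((pvAch (pvR m target array)).map (fun q => PySem.Str.join "" q.1)) := by
  have hinv := outer_inv m target array [] none none PySem.Dict.empty inv_init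
  simp only [List.nil_append] at hinv
  unfold solution
  rcases hP : solOuterA m target array none none PySem.Dict.empty with ⟨minD, best, ans⟩
  rw [hP] at hinv
  obtain ⟨h1, h2, h3, h4⟩ := hinv
  simp only at h1 h2 h3 h4
  dsimp only
  cases hR : pvR m target array with
  | nil =>
    rw [hR] at h2
    simp only [pvAch, List.filter_nil, List.map_nil, List.getLast?_nil] at h2 ⊢
    rw [h2]
  | cons p ps =>
    rw [hR] at h1 h2 h3
    obtain ⟨q, hq, hq2⟩ := mval_mem (p :: ps) (by simp)
    have hqa : q ∈ pvAch (p :: ps) := List.mem_filter.mpr ⟨hq, by simp [hq2]⟩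
    obtain ⟨x, hx⟩ : ∃ x, ((pvAch (p :: ps)).map (·.1)).getLast? = some x := by
      cases h : ((pvAch (p :: ps)).map (·.1)).getLast? with
      | none =>
        rw [List.getLast?_eq_none_iff, List.map_eq_nil_iff] at h
        exact absurd h (List.ne_nil_of_mem hqa)
      | some x => exact ⟨x, rfl⟩
    rw [hx]
    rw [h2, hx]
    cases x with
    | nil => rfl
    | cons a as =>
      rw [h1]
      simp only [if_neg (by simp : ¬(p :: ps = []))]
      rw [h3 (by simp)]


theorem pvR_nonpos (m : Int) (target : String) (array : List (List String)) (hm : m ≤ 0) :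
    pvR m target array = array.map (fun s => (s, (0 : Int))) := by
  unfold pvR
  rw [show m.toNat = 0 by omega]
  rw [show (fun s => (solGoA target s 0 0 0).map (fun d => (s, d)))
        = (some ∘ fun s => ((s : List String), (0 : Int))) by funext s; rfl]
  rw [List.filterMap_eq_map]

theorem mval_const0 (R : List (List String × Int)) (h : ∀ q ∈ R, q.2 = 0) (hne : R ≠ []) :
    pvMval R = 0 := by
  obtain ⟨q, hq, hq2⟩ := mval_mem R hne
  rw [← hq2]
  exact h q hq

theorem ach_const0 (R : List (List String × Int)) (h : ∀ q ∈ R, q.2 = 0) (hne : R ≠ []) :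
    pvAch R = R := by
  unfold pvAch
  rw [mval_const0 R h hne]
  apply List.filter_eq_self.mpr
  intro q hq
  simp [h q hq]

theorem mem_pvR_pos (m : Int) (target : String) (array : List (List String))
    (hm : 0 < m) (p : List String × Int) (hp : p ∈ pvR m target array) : p.1 ≠ [] := by
  obtain ⟨s, _, hs⟩ := List.mem_filterMap.mp hp
  cases hgo : solGoA target s m.toNat 0 0 with
  | none => rw [hgo] at hs; simp at hs
  | some d =>
    rw [hgo] at hs
    simp at hs
    subst hs
    dsimp only
    intro hnil
    subst hnil
    obtain ⟨k, hk⟩ : ∃ k, m.toNat = k + 1 := ⟨m.toNat - 1, by omega⟩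
    rw [hk] at hgo
    have hget : PySem.List.pyGet? ([] : List String) 0 = none := rfl
    rw [solGoA] at hgo
    cases hc : PySem.Str.pyGet? target 0 <;> rw [hc, hget] at hgo <;> simp at hgo

theorem main_eq (m : Int) (n : Int) (target : String) (array : List (List String))
    (hD : ¬ D_solution m n target array) : solution m n target array = solution_alt m n target array := by
  rw [a_char m n target array, b_char m n target array]
  cases hR : pvR m target array with
  | nil => rfl
  | cons p ps =>
    obtain ⟨q, hq, hq2⟩ := mval_mem (p :: ps) (by simp)
    have hqa : q ∈ pvAch (p :: ps) := List.mem_filter.mpr ⟨hq, by simp [hq2]⟩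
    obtain ⟨x, hx⟩ : ∃ x, ((pvAch (p :: ps)).map (·.1)).getLast? = some x := by
      cases h : ((pvAch (p :: ps)).map (·.1)).getLast? with
      | none =>
        rw [List.getLast?_eq_none_iff, List.map_eq_nil_iff] at h
        exact absurd h (List.ne_nil_of_mem hqa)
      | some x => exact ⟨x, rfl⟩
    rw [hx]
    cases x with
    | cons a as => rfl
    | nil =>
      exfalso
      rw [List.getLast?_map] at hx
      cases hal : (pvAch (p :: ps)).getLast? with
      | none => rw [hal] at hx; simp at hx
      | some ql =>
        rw [hal] at hx
        simp at hx
        have hql_mem : ql ∈ pvAch (p :: ps) := List.mem_of_getLast? hal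
        have hql_R : ql ∈ pvR m target array := by
          rw [hR]; exact List.mem_of_mem_filter hql_mem
        rcases (by omega : 0 < m ∨ m ≤ 0) with hm | hm
        · exact mem_pvR_pos m target array hm ql hql_R hx
        · have hmap := pvR_nonpos m target array hm
          have hane : array ≠ [] := by
            intro hnil
            subst hnil
            simp [pvR] at hR
          apply hD
          refine ⟨hm, hane, ?_⟩
          have h0' : ∀ q ∈ (p :: ps), q.2 = 0 := by
            rw [← hR, hmap]
            intro q hq'
            obtain ⟨s, _, rfl⟩ := List.mem_map.mp hq'
            rfl
          have hach : pvAch (p :: ps) = p :: ps := ach_const0 _ h0' (by simp)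
          rw [hach, ← hR, hmap, List.getLast?_map] at hal
          cases harr : array.getLast? with
          | none => rw [harr] at hal; simp at hal
          | some l =>
            rw [harr] at hal
            have hlq : (l, (0 : Int)) = ql := by simpa using hal
            have hle : l = [] := by rw [← hx, ← hlq]
            rw [hle]

theorem chars_join_last : ∀ (ps : List (List Char)), ps.getLast? = some [] →
    PySem.Chars.join [' '] ps = [] ∨ (PySem.Chars.join [' '] ps).getLast? = some ' ' := by
  intro ps
  induction ps with
  | nil => intro h; simp at h
  | cons a rest ih =>
    intro h
    cases rest with
    | nil =>
      simp at h
      left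
      rw [PySem.Chars.join_singleton, h]
    | cons b rest2 =>
      rw [PySem.Chars.join_cons_cons]
      have h2 : (b :: rest2).getLast? = some [] := by simpa using h
      rcases ih h2 with hj | hj
      · right
        rw [hj, List.append_nil, List.getLast?_concat]
      · right
        rw [List.getLast?_append, hj]
        rfl

theorem join_ne_none (xs : List String) (h : xs.getLast? = some "") :
    PySem.Str.join " " xs ≠ "None" := by
  intro he
  have ht := congrArg String.toList he
  rw [PySem.Str.toList_join] at ht
  have hl : (xs.map String.toList).getLast? = some [] := by
    rw [List.getLast?_map, h]; rfl
  rw [show (" " : String).toList = [' '] from rfl] at ht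
  rcases chars_join_last _ hl with hj | hj
  · rw [hj] at ht
    exact absurd ht (by decide)
  · rw [ht] at hj
    exact absurd hj (by decide)


-- ===== VERDICT (by name: the statement is the Claim_ definition above) =====
theorem solution_spec : Claim_unchanged_solution := by
  intro m n target array _ _ hD
  exact main_eq m n target array hD

theorem solution_changed : Claim_changed_solution := by
  unfold Claim_changed_solution; decide

theorem solution_tight : Claim_exact_solution := by
  unfold Claim_exact_solution
  intro m n target array _ _ hD
  obtain ⟨hm, hane, hlast⟩ := hD
  rw [a_char m n target array, b_char m n target array]
  have hmap := pvR_nonpos m target array hm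
  obtain ⟨a, rest, rfl⟩ : ∃ a rest, array = a :: rest := by
    cases array with
    | nil => exact absurd rfl hane
    | cons a r => exact ⟨a, r, rfl⟩
  simp only [List.map_cons] at hmap
  rw [hmap]
  have h0 : ∀ q ∈ ((a, (0 : Int)) :: rest.map (fun s => (s, (0 : Int)))), q.2 = 0 := by
    intro q hq
    rcases List.mem_cons.mp hq with h | h
    · subst h; rfl
    · obtain ⟨s, _, rfl⟩ := List.mem_map.mp h; rfl
  have hach := ach_const0 _ h0 (by simp)
  rw [hach]
  have hfst : (((a, (0 : Int)) :: rest.map (fun s => (s, (0 : Int)))).map (·.1)) = a :: rest := by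
    simp [List.map_map, Function.comp_def]
  rw [hfst, hlast]
  have hxs : ((a :: rest).map (fun s => PySem.Str.join "" s)).getLast? = some "" := by
    rw [List.getLast?_map, hlast]
    rfl
  dsimp only
  rw [hach]
  have hmm : (((a, (0 : Int)) :: rest.map (fun s => (s, (0 : Int)))).map
        (fun q => PySem.Str.join "" q.1)) = (a :: rest).map (fun s => PySem.Str.join "" s) := by
    simp [List.map_map, Function.comp_def]
  rw [hmm]
  exact (join_ne_none _ hxs).symm
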